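-- pv_equiv track=rewrite | github.com/NOMADxzy/tryHard | 笔试/rongyao/241008/p1/main.py | mod_exp_sum
-- ===== SOURCE A (Python) =====
-- def mod_exp_sum(n, l):
--     MOD = 1000000007
--     result = 0
--     current_power = 1
--
--     for i in range(1, l + 1):
--         current_power = (current_power * n) % MOD
--         result = (result + current_power) % MOD
--
--     return result
-- ===== SOURCE B (Python) =====
-- def mod_exp_sum(n, l):
--     MOD = 1000000007
--
--     def f(k):
--         # returns (sum_{i=1}^{k} n^i mod MOD, n^k mod MOD)
--         if k == 0:
--             return (0, 1)
--         if k % 2 == 1: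
--             s, p = f(k - 1)
--             p = p * n % MOD
--             return ((s + p) % MOD, p)
--         s, p = f(k // 2)
--         return ((s + s * p) % MOD, p * p % MOD)
--
--     if l <= 0:
--         return 0
--     return f(l)[0]
-- ===== Notes on version B (the rewrite author's own statement) =====
-- stated objective: faster
-- what changed: Replaced A's linear loop (one modular multiply-accumulate per exponent) by an O(log l) divide-and-conquer recursion using S(2m) = S(m)*(1 + n^m) mod p, computing the running power by squaring; no modular inverse needed.
import Mathlib
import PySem

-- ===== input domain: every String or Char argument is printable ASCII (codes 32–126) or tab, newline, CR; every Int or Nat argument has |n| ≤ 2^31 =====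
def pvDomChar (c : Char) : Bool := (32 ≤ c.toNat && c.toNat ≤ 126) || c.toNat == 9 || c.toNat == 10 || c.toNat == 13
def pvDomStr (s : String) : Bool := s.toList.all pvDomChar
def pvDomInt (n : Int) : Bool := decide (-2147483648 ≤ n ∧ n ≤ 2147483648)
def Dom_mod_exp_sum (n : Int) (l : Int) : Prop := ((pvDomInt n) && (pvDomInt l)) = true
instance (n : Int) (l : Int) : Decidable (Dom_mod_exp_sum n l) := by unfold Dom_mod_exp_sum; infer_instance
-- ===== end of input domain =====

-- B replaces A's O(l) accumulation loop by an O(log l) halving recursion on the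
-- exponent (S(2m) = S(m)·(1 + n^m) mod p), a genuinely different algorithm.

-- ===== PORT A =====
def mod_exp_sum (n : Int) (l : Int) : Int :=
  let MOD : Int := 1000000007
  let st := (PySem.List.pyRange 1 (l + 1) 1).foldl
    (fun (st : Int × Int) _i =>
      let current_power := PySem.Int.mod (st.2 * n) MOD
      (PySem.Int.mod (st.1 + current_power) MOD, current_power))
    (0, 1)
  st.1

-- ===== PORT B =====
-- helper f of Source B: returns (sum_{i=1}^k n^i mod MOD, n^k mod MOD), recursing on k-1 / k//2
def pvF (n : Int) (k : Nat) : Int × Int :=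
  if k = 0 then (0, 1)
  else if k % 2 = 1 then
    let sp := pvF n (k - 1)
    let p := PySem.Int.mod (sp.2 * n) 1000000007
    (PySem.Int.mod (sp.1 + p) 1000000007, p)
  else
    let sp := pvF n (k / 2)
    (PySem.Int.mod (sp.1 + sp.1 * sp.2) 1000000007, PySem.Int.mod (sp.2 * sp.2) 1000000007)
termination_by k
decreasing_by all_goals omega

def mod_exp_sum_alt (n : Int) (l : Int) : Int :=
  if l ≤ 0 then 0 else (pvF n l.toNat).1

-- ===== PRECONDITION & SPEC =====
def Spec_mod_exp_sum (n : Int) (l : Int) (out : Int) : Prop := out = mod_exp_sum_alt n l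
instance (n : Int) (l : Int) (out : Int) : Decidable (Spec_mod_exp_sum n l out) := by unfold Spec_mod_exp_sum; infer_instance

-- ===== CLAIM (what is proved, stated in full; the proofs are below) =====
def Claim_equal_mod_exp_sum : Prop := ∀ (n : Int) (l : Int), Dom_mod_exp_sum n l → Spec_mod_exp_sum n l (mod_exp_sum n l)

-- ===== LEMMAS AND PROOFS =====

-- reference value: sum_{i=1}^{k} n^i (exact, over Int)
def pvS (n : Int) (k : Nat) : Int := ∑ i ∈ Finset.range k, n ^ (i + 1)

-- A's loop body (index ignored), with Python % rewritten to Int.emod (modulus is positive)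
def pvStep (n : Int) (st : Int × Int) : Int × Int :=
  ((st.1 + st.2 * n % 1000000007) % 1000000007, st.2 * n % 1000000007)

theorem pvModEq (a M : Int) : a % M ≡ a [ZMOD M] := Int.emod_emod_of_dvd a dvd_rfl

theorem pvS_succ (n : Int) (k : Nat) : pvS n (k + 1) = pvS n k + n ^ (k + 1) := by
  simp [pvS, Finset.sum_range_succ]

theorem pvS_two_mul (n : Int) (m : Nat) : pvS n (2 * m) = pvS n m + pvS n m * n ^ m := by
  have h : 2 * m = m + m := by omega
  rw [h, pvS, Finset.sum_range_add]
  congr 1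
  · rw [pvS, Finset.sum_mul]
    apply Finset.sum_congr rfl
    intro i _
    ring

theorem foldl_ignore {α β : Type} (g : α → α) (xs : List β) (st : α) :
    xs.foldl (fun s _ => g s) st = g^[xs.length] st := by
  induction xs generalizing st with
  | nil => rfl
  | cons x xs ih => simp [List.foldl, ih, Function.iterate_succ_apply]

theorem pvStep_iterate (n : Int) (k : Nat) :
    (pvStep n)^[k] (0, 1) = (pvS n k % 1000000007, n ^ k % 1000000007) := by
  induction k with
  | zero => norm_num [pvS]
  | succ k ih =>
    rw [Function.iterate_succ_apply', ih, pvStep]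
    have hp : n ^ k % 1000000007 * n % 1000000007 = n ^ (k + 1) % 1000000007 := by
      rw [pow_succ]
      exact (pvModEq (n ^ k) 1000000007).mul_right n
    have hs : (pvS n k % 1000000007 + n ^ (k + 1) % 1000000007) % 1000000007
        = pvS n (k + 1) % 1000000007 := by
      rw [pvS_succ]
      exact (pvModEq _ _).add (pvModEq _ _)
    simp only [hp]
    exact Prod.ext hs rfl

theorem pvF_eq (n : Int) (k : Nat) :
    pvF n k = (pvS n k % 1000000007, n ^ k % 1000000007) := by
  induction k using Nat.strong_induction_on with
  | _ k ih =>
    rw [pvF]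
    have hmod : ∀ a : Int, PySem.Int.mod a 1000000007 = a % 1000000007 := fun a =>
      PySem.Int.mod_eq_emod_of_pos (by norm_num)
    by_cases h0 : k = 0
    · simp [h0, pvS]
    · by_cases hodd : k % 2 = 1
      · obtain ⟨m, rfl⟩ : ∃ m, k = m + 1 := ⟨k - 1, by omega⟩
        simp only [if_neg h0, if_pos hodd, Nat.add_sub_cancel, ih m (by omega), hmod]
        have hp : n ^ m % 1000000007 * n % 1000000007 = n ^ (m + 1) % 1000000007 := by
          rw [pow_succ]
          exact (pvModEq (n ^ m) 1000000007).mul_right n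
        refine Prod.ext ?_ hp
        simp only [hp]
        rw [pvS_succ]
        exact (pvModEq _ _).add (pvModEq _ _)
      · obtain ⟨m, rfl⟩ : ∃ m, k = 2 * m := ⟨k / 2, by omega⟩
        have h2 : 2 * m / 2 = m := by omega
        simp only [if_neg h0, if_neg hodd, h2, ih m (by omega), hmod]
        refine Prod.ext ?_ ?_
        · rw [pvS_two_mul]
          exact (pvModEq _ _).add ((pvModEq _ _).mul (pvModEq _ _))
        · rw [two_mul, pow_add]
          exact (pvModEq _ _).mul (pvModEq _ _)

-- ===== VERDICT (by name: the statement is the Claim_ definition above) =====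
theorem mod_exp_sum_spec : Claim_equal_mod_exp_sum := by
  intro n l _
  show mod_exp_sum n l = mod_exp_sum_alt n l
  unfold mod_exp_sum mod_exp_sum_alt
  by_cases hl : l ≤ 0
  · rw [PySem.List.pyRange_one_eq_nil (by omega)]
    simp [hl]
  · have hstep : (fun (st : Int × Int) (_i : Int) =>
        (PySem.Int.mod (st.1 + PySem.Int.mod (st.2 * n) 1000000007) 1000000007,
         PySem.Int.mod (st.2 * n) 1000000007)) = fun st _ => pvStep n st := by
      funext st i
      simp only [pvStep, PySem.Int.mod_eq_emod_of_pos (show (0:Int) < 1000000007 by norm_num)]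
    have hll : l + 1 - 1 = l := by ring
    simp only [hstep, hl, if_false]
    rw [foldl_ignore, PySem.List.length_pyRange_one, hll, pvStep_iterate, pvF_eq]
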